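-- pv_equiv track=rewrite | github.com/riddheshSajwan/data_structures_algorithm | stacks/maxFrequencyStack.py | solve
-- ===== SOURCE A (Python) =====
-- def solve(A):
--     max_freq = float('-inf')
--     freq_map = {}
--     stack_map = {}
--     res = []
--     for item in A:
--         action = item[0]
--         element = item[1]
--         if action == 1:
--             if element not in freq_map:
--                 freq_map[element] = 0
--             freq_map[element] += 1
--             max_freq = max(max_freq,freq_map[element])
--             if freq_map[element] not in stack_map:
--                 stack_map[freq_map[element]] = []
--             stack_map[freq_map[element]].append(element)
--             res.append(-1)
--         else:
--             freq_map[stack_map[max_freq][-1]] -= 1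
--             res.append(stack_map[max_freq].pop())
--             if stack_map[max_freq] == []: max_freq -= 1
--     return res
-- ===== SOURCE B (Python) =====
-- def _pop_eq(m, rev):
--     # remove the first entry whose stored frequency equals m; returns (entry, rest)
--     head, tail = rev[0], rev[1:]
--     if head[0] == m:
--         return head, tail
--     entry, rest = _pop_eq(m, tail)
--     return entry, [head] + rest
--
--
-- def solve(A):
--     rev = []   # (frequency at push time, element), most recent push first
--     res = []
--     for item in A:
--         action, element = item[0], item[1]
--         if action == 1:
--             c = sum(1 for _, x in rev if x == element)
--             rev = [(c + 1, element)] + rev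
--             res.append(-1)
--         else:
--             m = max(f for f, _ in rev)
--             (_, element), rev = _pop_eq(m, rev)
--             res.append(element)
--     return res
-- ===== Notes on version B (the rewrite author's own statement) =====
-- stated objective: alternative
-- what changed: Replaces A's three pieces of mutable state (frequency dict, frequency->bucket-stack dict, running max_freq) by a single flat stack of (frequency-at-push, element) pairs: a push counts the element's occurrences in the stack, a pop scans for the first (most recent) entry carrying the maximal stored frequency and removes it.
import Mathlib
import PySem

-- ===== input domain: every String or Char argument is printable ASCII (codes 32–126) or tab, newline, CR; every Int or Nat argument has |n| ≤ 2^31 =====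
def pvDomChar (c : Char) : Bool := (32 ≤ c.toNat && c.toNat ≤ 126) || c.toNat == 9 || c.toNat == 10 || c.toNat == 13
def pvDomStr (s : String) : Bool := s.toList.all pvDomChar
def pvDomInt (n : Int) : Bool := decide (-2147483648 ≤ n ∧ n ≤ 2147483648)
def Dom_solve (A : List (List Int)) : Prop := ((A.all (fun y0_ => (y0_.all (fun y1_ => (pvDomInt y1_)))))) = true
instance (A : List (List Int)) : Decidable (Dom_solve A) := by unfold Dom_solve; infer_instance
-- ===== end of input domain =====

-- B replaces A's freq-dict / bucket-dict / running-max state by one flat stack of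
-- (frequency-at-push, element) pairs; same return value, no speed claim.

-- ===== PORT A =====
-- max(max_freq, v) with max_freq : Option Int, none = float('-inf') (so max(-inf, v) = v)
def pyMaxNegInf (mf : Option Int) (v : Int) : Int :=
  match mf with
  | none => v
  | some z => max z v

-- state: (freq_map, stack_map, max_freq, res)
def stepA (s : PySem.Dict Int Int × PySem.Dict Int (List Int) × Option Int × List Int)
    (item : List Int) :
    PySem.Dict Int Int × PySem.Dict Int (List Int) × Option Int × List Int :=
  match s with
  | (fm, sm, mf, res) =>
    match item with
    | action :: element :: _ =>
      if action = 1 then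
        -- if element not in freq_map: freq_map[element] = 0
        let fm1 := if fm.contains element then fm else fm.insert element 0
        -- freq_map[element] += 1
        let v := fm1.getD element 0 + 1
        let fm2 := fm1.insert element v
        -- max_freq = max(max_freq, freq_map[element])
        let mf' := some (pyMaxNegInf mf v)
        -- if v not in stack_map: stack_map[v] = [];  stack_map[v].append(element)
        let sm' := sm.insert v (sm.getD v [] ++ [element])
        (fm2, sm', mf', res ++ [-1])
      else
        match mf with
        | none => (fm, sm, mf, res)  -- Python: KeyError stack_map[-inf]; outside Pre_
        | some m =>
          match (sm.getD m []).getLast? with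
          | none => (fm, sm, mf, res)  -- Python: KeyError/IndexError; outside Pre_
          | some x =>
            -- freq_map[stack_map[max_freq][-1]] -= 1   (key x exists under Pre_)
            let fm' := fm.insert x (fm.getD x 0 - 1)
            -- res.append(stack_map[max_freq].pop())
            let b := (sm.getD m []).dropLast
            let sm' := sm.insert m b
            -- if stack_map[max_freq] == []: max_freq -= 1
            let mf' := if b = [] then some (m - 1) else some m
            (fm', sm', mf', res ++ [x])
    | _ => (fm, sm, mf, res)  -- Python: IndexError item[0]/item[1]; outside Pre_

def solve (A : List (List Int)) : List Int :=
  (A.foldl stepA (PySem.Dict.empty, PySem.Dict.empty, none, [])).2.2.2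

-- ===== PORT B =====
-- _pop_eq m rev: remove the first entry whose stored frequency equals m
def popEq (m : Int) : List (Int × Int) → Option ((Int × Int) × List (Int × Int))
  | [] => none  -- Python: IndexError rev[0]; unreachable (m is the max of a nonempty rev)
  | p :: t =>
    if p.1 = m then some (p, t)
    else
      match popEq m t with
      | some (e, rest) => some (e, p :: rest)
      | none => none

def stepB (s : List (Int × Int) × List Int) (item : List Int) :
    List (Int × Int) × List Int :=
  match s with
  | (rev, res) =>
    match item with
    | action :: element :: _ =>
      if action = 1 then
        -- c = sum(1 for _, x in rev if x == element)
        let c := rev.countP (fun p => p.2 == element)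
        (((c : Int) + 1, element) :: rev, res ++ [-1])
      else
        -- m = max(f for f, _ in rev)  (ValueError on empty; outside Pre_)
        match PySem.List.max? (rev.map Prod.fst) (fun v => v) with
        | none => (rev, res)
        | some m =>
          match popEq m rev with
          | none => (rev, res)  -- unreachable: m occurs in rev
          | some (e, rev') => (rev', res ++ [e.2])
    | _ => (rev, res)  -- Python: IndexError; outside Pre_

def solve_alt (A : List (List Int)) : List Int :=
  (A.foldl stepB ([], [])).2

-- ===== PRECONDITION & SPEC =====
-- Pre_ excludes exactly the inputs where A raises: an item with fewer than two
-- entries (IndexError on item[0]/item[1]) and a pop issued when the stack is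
-- empty, i.e. a prefix with more pops than pushes (KeyError on stack_map[max_freq]).
def Pre_solve (A : List (List Int)) : Prop :=
  (∀ it ∈ A, 2 ≤ it.length) ∧
  ∀ n ∈ List.range (A.length + 1),
    (A.take n).countP (fun it => !(it.head? == some 1)) ≤
      (A.take n).countP (fun it => it.head? == some 1)
instance (A : List (List Int)) : Decidable (Pre_solve A) := by unfold Pre_solve; infer_instance

def pvWitness_solve : List (List Int) := [[1, 5], [1, 5], [1, 7], [0, 0], [0, 0], [1, 7], [0, 0]]

def Spec_solve (A : List (List Int)) (out : List Int) : Prop := out = solve_alt A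
instance (A : List (List Int)) (out : List Int) : Decidable (Spec_solve A out) := by unfold Spec_solve; infer_instance

-- ===== CLAIM (what is proved, stated in full; the proofs are below) =====
def Claim_equal_solve : Prop := ∀ (A : List (List Int)), Dom_solve A → Pre_solve A → Spec_solve A (solve A)

-- ===== LEMMAS AND PROOFS =====

-- [c, c-1, …, 1] : the stored frequencies of one element, most recent first
def desc : Nat → List Int
  | 0 => []
  | n + 1 => ((n : Int) + 1) :: desc n

-- the stored frequencies of element x in rev, most recent first
def fsts (rev : List (Int × Int)) (x : Int) : List Int :=
  (rev.filter (fun p => p.2 == x)).map Prod.fst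

-- simulation invariant between A's state and B's state
def SimInv (fm : PySem.Dict Int Int) (sm : PySem.Dict Int (List Int)) (mf : Option Int)
    (rev : List (Int × Int)) : Prop :=
  (∀ e : Int, fsts rev e = desc (fsts rev e).length ∧ fm.getD e 0 = ((fsts rev e).length : Int)) ∧
  (∀ f : Int, sm.getD f [] = ((rev.filter (fun p => p.1 == f)).map Prod.snd).reverse) ∧
  (∀ m : Int, PySem.List.max? (rev.map Prod.fst) (fun v => v) = some m → mf = some m) ∧
  (rev = [] → mf = none ∨ ∃ z, mf = some z ∧ z ≤ 0)

-- "runnable with a stack of size L": every pop finds a nonempty stack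
def Ok (L : Nat) : List (List Int) → Prop
  | [] => True
  | it :: rest =>
      2 ≤ it.length ∧
        (if it.head? == some 1 then Ok (L + 1) rest else 1 ≤ L ∧ Ok (L - 1) rest)

lemma mem_desc_le {y : Int} : ∀ {c : Nat}, y ∈ desc c → y ≤ (c : Int) := by
  intro c; induction c with
  | zero => simp [desc]
  | succ n ih =>
    intro h
    rcases List.mem_cons.1 h with h | h
    · omega
    · have := ih h; push_cast; omega

lemma one_mem_desc : ∀ {c : Nat}, 1 ≤ c → (1 : Int) ∈ desc c := by
  intro c; induction c with
  | zero => omega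
  | succ n ih =>
    intro _
    by_cases hn : 1 ≤ n
    · exact List.mem_cons_of_mem _ (ih hn)
    · interval_cases n <;> simp [desc]

lemma desc_split {c : Nat} {u v : List Int} {m : Int}
    (h : desc c = u ++ m :: v) (hm : ∀ y ∈ desc c, y ≤ m) :
    u = [] ∧ m = (c : Int) ∧ v = desc (c - 1) := by
  cases c with
  | zero => simp [desc] at h
  | succ n =>
    cases u with
    | nil =>
      simp [desc] at h
      obtain ⟨h1, h2⟩ := h
      refine ⟨rfl, by omega, by simpa [h2.symm] using rfl⟩
    | cons b u' =>
      exfalso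
      rw [desc, List.cons_append] at h
      obtain ⟨hb, ht⟩ := List.cons.inj h
      have hmem : m ∈ desc n := ht ▸ (List.mem_append.2 (Or.inr (List.mem_cons_self)))
      have h1 := mem_desc_le hmem
      have h2 := hm b (by rw [desc]; exact hb ▸ List.mem_cons_self)
      omega

lemma popEq_spec {m : Int} : ∀ {rev : List (Int × Int)}, (∃ p ∈ rev, p.1 = m) →
    ∃ l1 p l2, rev = l1 ++ p :: l2 ∧ p.1 = m ∧ (∀ q ∈ l1, q.1 ≠ m) ∧
      popEq m rev = some (p, l1 ++ l2) := by
  intro rev; induction rev with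
  | nil => rintro ⟨p, hp, _⟩; simp at hp
  | cons q t ih =>
    intro hex
    by_cases hq : q.1 = m
    · exact ⟨[], q, t, by simp, hq, by simp, by simp [popEq, hq]⟩
    · have hex' : ∃ p ∈ t, p.1 = m := by
        rcases hex with ⟨p, hp, hpm⟩
        rcases List.mem_cons.1 hp with h | h
        · exact absurd (h ▸ hpm) hq
        · exact ⟨p, h, hpm⟩
      obtain ⟨l1, p, l2, h1, h2, h3, h4⟩ := ih hex'
      refine ⟨q :: l1, p, l2, by simp [h1], h2, ?_, by simp [popEq, hq, h4]⟩
      intro r hr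
      rcases List.mem_cons.1 hr with h | h
      · exact h ▸ hq
      · exact h3 r h

lemma fst_mem_fsts {rev : List (Int × Int)} {q : Int × Int} (hq : q ∈ rev) :
    q.1 ∈ fsts rev q.2 := by
  unfold fsts
  exact List.mem_map.2 ⟨q, List.mem_filter.2 ⟨hq, by simp⟩, rfl⟩

lemma fsts_length_eq_countP (rev : List (Int × Int)) (x : Int) :
    (fsts rev x).length = rev.countP (fun p => p.2 == x) := by
  simp [fsts, List.countP_eq_length_filter]

lemma desc_length : ∀ n : Nat, (desc n).length = n := by
  intro n; induction n with
  | zero => rfl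
  | succ k ih => simp [desc, ih]

lemma fsts_cons (v e x : Int) (r : List (Int × Int)) :
    fsts ((v, e) :: r) x = if e = x then v :: fsts r x else fsts r x := by
  by_cases h : e = x <;> simp [fsts, h]

lemma fsts_append (r1 r2 : List (Int × Int)) (x : Int) :
    fsts (r1 ++ r2) x = fsts r1 x ++ fsts r2 x := by
  simp [fsts]

lemma mem_fsts {y x : Int} {r : List (Int × Int)} (h : y ∈ fsts r x) :
    y ∈ r.map Prod.fst := by
  simp only [fsts, List.mem_map] at h ⊢
  obtain ⟨p, hp, rfl⟩ := h
  exact ⟨p, (List.mem_filter.1 hp).1, rfl⟩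

lemma pad_getD (fm : PySem.Dict Int Int) (e e' : Int) :
    (if fm.contains e then fm else fm.insert e 0).getD e' 0 = fm.getD e' 0 := by
  split
  · rfl
  · rename_i h
    rw [PySem.Dict.getD_insert]
    split
    · rename_i he
      rw [he, PySem.Dict.getD_of_not_contains fm 0 (by simpa using h)]
    · rfl

lemma step_push (fm : PySem.Dict Int Int) (sm : PySem.Dict Int (List Int)) (mf : Option Int)
    (rev : List (Int × Int)) (res : List Int) (e : Int) (t : List Int)
    (hInv : SimInv fm sm mf rev) :
    ∃ fm' sm' mf',
      stepA (fm, sm, mf, res) (1 :: e :: t) = (fm', sm', mf', res ++ [-1]) ∧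
      stepB (rev, res) (1 :: e :: t) =
        ((((rev.countP (fun p => p.2 == e)) : Int) + 1, e) :: rev, res ++ [-1]) ∧
      SimInv fm' sm' mf' ((((rev.countP (fun p => p.2 == e)) : Int) + 1, e) :: rev) := by
  obtain ⟨hI1, hI2, hI3, hI4⟩ := hInv
  set c := rev.countP (fun p => p.2 == e) with hc
  have hcfst : (fsts rev e).length = c := fsts_length_eq_countP rev e
  have hfm : fm.getD e 0 = (c : Int) := by rw [(hI1 e).2, hcfst]
  have hv : (if fm.contains e then fm else fm.insert e 0).getD e 0 + 1 = (c : Int) + 1 := by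
    rw [pad_getD, hfm]
  refine ⟨(if fm.contains e then fm else fm.insert e 0).insert e ((c : Int) + 1),
      sm.insert ((c : Int) + 1) (sm.getD ((c : Int) + 1) [] ++ [e]),
      some (pyMaxNegInf mf ((c : Int) + 1)), ?_, ?_, ?_⟩
  · simp only [stepA, reduceIte]
    rw [hv]
  · simp only [stepB, reduceIte]
    rfl
  unfold SimInv
  refine ⟨?_, ?_, ?_, ?_⟩
  · -- I1
    intro e'
    rw [fsts_cons]
    by_cases he : e = e'
    · subst he
      rw [if_pos rfl]
      constructor
      · have h1 := (hI1 e).1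
        rw [h1, hcfst]
        show _ = desc ((desc c).length + 1)
        rw [desc_length]
        rfl
      · rw [PySem.Dict.getD_insert_self]
        simp only [List.length_cons, hcfst]
        push_cast; ring
    · rw [if_neg he]
      refine ⟨(hI1 e').1, ?_⟩
      rw [PySem.Dict.getD_insert_of_ne _ _ _ (fun h => he h.symm), pad_getD]
      exact (hI1 e').2
  · -- I2
    intro f
    by_cases hf : f = (c : Int) + 1
    · subst hf
      rw [PySem.Dict.getD_insert_self, hI2 ((c : Int) + 1)]
      simp
    · rw [PySem.Dict.getD_insert_of_ne _ _ _ hf, List.filter_cons]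
      have hne : ((((c : Int) + 1, e) : Int × Int).1 == f) = false := by
        rw [beq_eq_false_iff_ne]
        exact fun h => hf h.symm
      rw [hne, if_neg (by decide : ¬ (false = true))]
      exact hI2 f
  · -- I3a
    intro m hm
    simp only [List.map_cons] at hm
    have hmem := PySem.List.max?_mem hm
    have hub := PySem.List.max?_isMax hm
    simp only at hmem hub
    cases hmax2 : PySem.List.max? (rev.map Prod.fst) (fun v => v) with
    | none =>
      have hrev : rev = [] := by simpa using (PySem.List.max?_eq_none_iff _ _).1 hmax2
      subst hrev
      have hc0 : c = 0 := by simp [hc]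
      have hm1 : m = (c : Int) + 1 := by simpa using hmem
      rcases hI4 rfl with h | ⟨z, hz, hzle⟩
      · rw [h, hm1]; rfl
      · rw [hz, hm1]
        simp only [pyMaxNegInf]
        rw [max_eq_right (by omega)]
    | some M =>
      rw [hI3 M hmax2]
      simp only [pyMaxNegInf]
      have hMmem : M ∈ rev.map Prod.fst := PySem.List.max?_mem hmax2
      have hMub := PySem.List.max?_isMax hmax2
      have h1 : M ≤ m := hub M (List.mem_cons_of_mem _ hMmem)
      have h2 : (c : Int) + 1 ≤ m := hub _ List.mem_cons_self
      have h3 : m ≤ max M ((c : Int) + 1) := by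
        rcases List.mem_cons.1 hmem with h | h
        · rw [h]; exact le_max_right _ _
        · exact le_trans (hMub m h) (le_max_left _ _)
      have : max M ((c : Int) + 1) = m :=
        le_antisymm (max_le h1 h2) h3
      rw [this]
  · -- I3b
    intro h; simp at h

lemma step_pop (fm : PySem.Dict Int Int) (sm : PySem.Dict Int (List Int)) (mf : Option Int)
    (rev : List (Int × Int)) (res : List Int) (a e : Int) (t : List Int)
    (ha : a ≠ 1) (hrev : rev ≠ []) (hInv : SimInv fm sm mf rev) :
    ∃ fm' sm' mf' rev' x,
      stepA (fm, sm, mf, res) (a :: e :: t) = (fm', sm', mf', res ++ [x]) ∧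
      stepB (rev, res) (a :: e :: t) = (rev', res ++ [x]) ∧
      SimInv fm' sm' mf' rev' ∧
      rev'.length + 1 = rev.length := by
  obtain ⟨hI1, hI2, hI3, hI4⟩ := hInv
  have hmapne : rev.map Prod.fst ≠ [] := by simpa using hrev
  obtain ⟨M, hmax⟩ : ∃ M, PySem.List.max? (rev.map Prod.fst) (fun v => v) = some M := by
    cases h : PySem.List.max? (rev.map Prod.fst) (fun v => v) with
    | none => exact absurd ((PySem.List.max?_eq_none_iff _ _).1 h) hmapne
    | some M => exact ⟨M, rfl⟩
  have hmf : mf = some M := hI3 M hmax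
  have hMmem : M ∈ rev.map Prod.fst := PySem.List.max?_mem hmax
  have hMub : ∀ y ∈ rev.map Prod.fst, y ≤ M := PySem.List.max?_isMax hmax
  obtain ⟨p0, hp0mem, hp0⟩ := List.mem_map.1 hMmem
  obtain ⟨l1, p, l2, hsplit, hpM, hl1, hpopEq⟩ := popEq_spec (m := M) ⟨p0, hp0mem, hp0⟩
  obtain ⟨pf, px⟩ := p
  simp only at hpM
  have hpM' : M = pf := hpM.symm
  subst hpM'
  -- the bucket for M, seen through the flat stack
  have hl1nil : l1.filter (fun q => q.1 == M) = [] :=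
    List.filter_eq_nil_iff.2 (fun q hq => by simpa using hl1 q hq)
  have hfilterM : rev.filter (fun q => q.1 == M) = (M, px) :: l2.filter (fun q => q.1 == M) := by
    rw [hsplit, List.filter_append, List.filter_cons, hl1nil]
    simp
  have hbucket : sm.getD M [] =
      ((l2.filter (fun q => q.1 == M)).map Prod.snd).reverse ++ [px] := by
    rw [hI2 M, hfilterM]
    simp
  have hstepA : stepA (fm, sm, mf, res) (a :: e :: t) =
      (fm.insert px (fm.getD px 0 - 1),
       sm.insert M (((l2.filter (fun q => q.1 == M)).map Prod.snd).reverse),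
       (if ((l2.filter (fun q => q.1 == M)).map Prod.snd).reverse = ([] : List Int)
        then some (M - 1) else some M),
       res ++ [px]) := by
    simp only [stepA, if_neg ha, hmf, hbucket, List.getLast?_concat, List.dropLast_concat]
  have hstepB : stepB (rev, res) (a :: e :: t) = (l1 ++ l2, res ++ [px]) := by
    simp only [stepB, if_neg ha, hmax, hpopEq]
  -- the element px currently has frequency c, and M = c
  set c := (fsts rev px).length with hcdef
  have hcx : fsts rev px = desc c := (hI1 px).1
  have hdesc : desc c = fsts l1 px ++ M :: fsts l2 px := by
    rw [← hcx, hsplit, fsts_append, fsts_cons, if_pos rfl]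
  have hub' : ∀ y ∈ desc c, y ≤ M := fun y hy => hMub y (mem_fsts (hcx ▸ hy))
  obtain ⟨hl1x, hMc, hl2x⟩ := desc_split hdesc hub'
  have hc1 : 1 ≤ c := by
    rcases Nat.eq_zero_or_pos c with h | h
    · rw [h] at hdesc; simp [desc] at hdesc
    · exact h
  -- the preserved first invariant, used twice below
  have hI1' : ∀ e' : Int,
      fsts (l1 ++ l2) e' = desc (fsts (l1 ++ l2) e').length ∧
      (fm.insert px (fm.getD px 0 - 1)).getD e' 0 = ((fsts (l1 ++ l2) e').length : Int) := by
    intro e'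
    by_cases he : px = e'
    · subst he
      have hf' : fsts (l1 ++ l2) px = desc (c - 1) := by
        rw [fsts_append, hl1x, hl2x]; rfl
      have hlen : (fsts (l1 ++ l2) px).length = c - 1 := by rw [hf', desc_length]
      refine ⟨by rw [hf', desc_length], ?_⟩
      rw [PySem.Dict.getD_insert_self, (hI1 px).2, hlen, ← hcdef]
      push_cast [hc1]
      ring
    · have hf' : fsts (l1 ++ l2) e' = fsts rev e' := by
        rw [fsts_append, hsplit, fsts_append, fsts_cons, if_neg he]
      refine ⟨by rw [hf']; exact (hI1 e').1, ?_⟩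
      rw [PySem.Dict.getD_insert_of_ne _ _ _ (fun h => he h.symm), hf']
      exact (hI1 e').2
  -- membership transfer from the new stack into the old one
  have hsub : ∀ q : Int × Int, q ∈ l1 ++ l2 → q ∈ rev := by
    intro q hq
    rw [hsplit]
    rcases List.mem_append.1 hq with h | h
    · exact List.mem_append.2 (Or.inl h)
    · exact List.mem_append.2 (Or.inr (List.mem_cons_of_mem _ h))
  refine ⟨_, _, _, l1 ++ l2, px, hstepA, hstepB, ⟨hI1', ?_, ?_, ?_⟩, ?_⟩
  · -- I2
    intro f
    by_cases hf : f = M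
    · subst hf
      rw [PySem.Dict.getD_insert_self, List.filter_append, hl1nil, List.nil_append]
    · rw [PySem.Dict.getD_insert_of_ne _ _ _ hf, hI2 f, hsplit, List.filter_append,
        List.filter_append, List.filter_cons]
      have hne : (((M, px) : Int × Int).1 == f) = false := by
        rw [beq_eq_false_iff_ne]
        exact fun h => hf h.symm
      rw [hne, if_neg (by decide : ¬ (false = true))]
  · -- I3
    intro m' hm'
    have hm'mem := PySem.List.max?_mem hm'
    have hm'ub := PySem.List.max?_isMax hm'
    simp only at hm'mem hm'ub
    have hub2 : ∀ y ∈ (l1 ++ l2).map Prod.fst, y ≤ M := by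
      intro y hy
      obtain ⟨q, hq, rfl⟩ := List.mem_map.1 hy
      exact hMub _ (List.mem_map.2 ⟨q, hsub q hq, rfl⟩)
    by_cases hb : (l2.filter (fun q => q.1 == M)) = []
    · -- bucket for M is now empty: max_freq drops to M - 1
      rw [if_pos (by rw [hb]; rfl)]
      have hnoM : ∀ q ∈ l1 ++ l2, q.1 ≠ M := by
        intro q hq
        rcases List.mem_append.1 hq with h | h
        · exact hl1 q h
        · intro hqM
          have : q ∈ l2.filter (fun q => q.1 == M) := List.mem_filter.2 ⟨h, by simpa using hqM⟩
          rw [hb] at this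
          simp at this
      have hub3 : ∀ y ∈ (l1 ++ l2).map Prod.fst, y ≤ M - 1 := by
        intro y hy
        obtain ⟨q, hq, rfl⟩ := List.mem_map.1 hy
        have h1 := hub2 _ hy
        have h2 := hnoM q hq
        omega
      have hmem3 : M - 1 ∈ (l1 ++ l2).map Prod.fst := by
        rcases Nat.lt_or_ge 1 c with hc2 | hc2
        · -- c ≥ 2 : px still has entries, topped by frequency c - 1 = M - 1
          have hf' : fsts (l1 ++ l2) px = desc (c - 1) := by
            rw [fsts_append, hl1x, hl2x]; rfl
          have : ((c : Int) - 1) ∈ fsts (l1 ++ l2) px := by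
            rw [hf']
            obtain ⟨k, hk⟩ : ∃ k, c - 1 = k + 1 := ⟨c - 2, by omega⟩
            rw [hk]
            have : ((k : Int) + 1) ∈ desc (k + 1) := by simp [desc]
            simpa [hk] using (by push_cast [show c - 1 = k + 1 from hk]; omega : (c : Int) - 1 = (k : Int) + 1) ▸ this
          rw [hMc]
          exact mem_fsts this
        · -- c = 1 : then M = 1 and some remaining entry would carry frequency 1 = M
          exfalso
          obtain ⟨q, hq, _⟩ := List.mem_map.1 hm'mem
          have hq1 := fst_mem_fsts hq
          have := (hI1' q.2).1
          have hne : fsts (l1 ++ l2) q.2 ≠ [] := fun h => by rw [h] at hq1; simp at hq1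
          have hlen1 : 1 ≤ (fsts (l1 ++ l2) q.2).length := List.length_pos_iff.2 hne
          have h1mem : (1 : Int) ∈ fsts (l1 ++ l2) q.2 := by
            rw [this]; exact one_mem_desc hlen1
          have hM1 : M = 1 := by omega
          obtain ⟨q', hq', hq'1⟩ := List.mem_map.1 (mem_fsts h1mem)
          exact hnoM q' hq' (by omega)
      have : m' = M - 1 := by
        have h1 := hm'ub _ hmem3
        have h2 : m' ≤ M - 1 := hub3 _ hm'mem
        omega
      rw [this]
    · -- bucket for M still nonempty: max_freq stays M
      rw [if_neg (by simpa using hb)]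
      obtain ⟨q, hq⟩ := List.exists_mem_of_ne_nil _ hb
      have hqmem := List.mem_filter.1 hq
      have hqM : q.1 = M := by simpa using hqmem.2
      have hmemM : M ∈ (l1 ++ l2).map Prod.fst :=
        List.mem_map.2 ⟨q, List.mem_append.2 (Or.inr hqmem.1), hqM⟩
      have : m' = M := by
        have h1 := hm'ub _ hmemM
        have h2 := hub2 _ hm'mem
        omega
      rw [this]
  · -- I4
    intro hnil
    have hl2 : l2 = [] := (List.append_eq_nil_iff.1 hnil).2
    have hl1' : l1 = [] := (List.append_eq_nil_iff.1 hnil).1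
    have hrev1 : rev = [(M, px)] := by rw [hsplit, hl1', hl2]; rfl
    have hc1' : c = 1 := by
      have : fsts rev px = [M] := by
        rw [hrev1, fsts_cons]
        simp [fsts]
      rw [hcdef, this]
      rfl
    right
    refine ⟨M - 1, ?_, by omega⟩
    rw [hl2]
    simp [hMc, hc1']
  · rw [hsplit]
    simp
    omega

-- one step preserves the simulation and appends the same output
lemma step_eq {fm : PySem.Dict Int Int} {sm : PySem.Dict Int (List Int)} {mf : Option Int} {rev : List (Int × Int)} (res : List Int) (item : List Int)
    (h2 : 2 ≤ item.length)
    (hpop : ¬ (item.head? == some 1) = true → rev ≠ [])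
    (hInv : SimInv fm sm mf rev) :
    ∃ fm' sm' mf' rev' t,
      stepA (fm, sm, mf, res) item = (fm', sm', mf', res ++ [t]) ∧
      stepB (rev, res) item = (rev', res ++ [t]) ∧
      SimInv fm' sm' mf' rev' ∧
      rev'.length = (if (item.head? == some 1) = true then rev.length + 1 else rev.length - 1) := by
  obtain ⟨a, e, t, rfl⟩ : ∃ a e t, item = a :: e :: t := by
    match item with
    | [] => simp at h2
    | [a] => simp at h2
    | a :: e :: t => exact ⟨a, e, t, rfl⟩
  by_cases ha : a = 1
  · subst ha
    obtain ⟨fm', sm', mf', hA, hB, hInv'⟩ := step_push fm sm mf rev res e t hInv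
    refine ⟨fm', sm', mf', _, -1, hA, hB, hInv', ?_⟩
    rw [if_pos (by simp)]
    simp
  · have hane : ((a :: e :: t).head? == some 1) = false := by
      simp only [List.head?_cons, beq_iff_eq, Option.some.injEq]
      exact decide_eq_false ha
    have hrev : rev ≠ [] := hpop (by rw [hane]; simp)
    obtain ⟨fm', sm', mf', rev', x, hA, hB, hInv', hlen⟩ :=
      step_pop fm sm mf rev res a e t ha hrev hInv
    refine ⟨fm', sm', mf', rev', x, hA, hB, hInv', ?_⟩
    rw [if_neg (by rw [hane]; simp)]
    omega

lemma fold_eq : ∀ (A : List (List Int)) fm sm mf rev (res : List Int),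
    SimInv fm sm mf rev → Ok rev.length A →
    (A.foldl stepA (fm, sm, mf, res)).2.2.2 = (A.foldl stepB (rev, res)).2 := by
  intro A; induction A with
  | nil => intro _ _ _ _ _ _ _; rfl
  | cons item rest ih =>
    intro fm sm mf rev res hInv hOk
    obtain ⟨hlen, hOk'⟩ := hOk
    by_cases hp : (item.head? == some 1) = true
    · obtain ⟨fm', sm', mf', rev', t, hA, hB, hInv', hlen'⟩ :=
        step_eq res item hlen (fun h => absurd hp h) hInv
      rw [List.foldl_cons, List.foldl_cons, hA, hB]
      have := ih fm' sm' mf' rev' (res ++ [t]) hInv' (by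
        rw [hlen', if_pos hp]; simpa [hp] using hOk')
      exact this
    · rw [if_neg hp] at hOk'
      obtain ⟨hL, hOk''⟩ := hOk'
      obtain ⟨fm', sm', mf', rev', t, hA, hB, hInv', hlen'⟩ :=
        step_eq res item hlen (fun _ => by intro hnil; rw [hnil] at hL; simp at hL) hInv
      rw [List.foldl_cons, List.foldl_cons, hA, hB]
      exact ih fm' sm' mf' rev' (res ++ [t]) hInv' (by rw [hlen', if_neg hp]; exact hOk'')

lemma ok_of_count : ∀ (A : List (List Int)) (L : Nat),
    (∀ it ∈ A, 2 ≤ it.length) →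
    (∀ n : Nat, (A.take n).countP (fun it => !(it.head? == some 1)) ≤
        L + (A.take n).countP (fun it => it.head? == some 1)) →
    Ok L A := by
  intro A; induction A with
  | nil => intro L _ _; trivial
  | cons it rest ih =>
    intro L hlen hcnt
    refine ⟨hlen it List.mem_cons_self, ?_⟩
    by_cases hp : (it.head? == some 1) = true
    · rw [if_pos hp]
      refine ih (L + 1) (fun x hx => hlen x (List.mem_cons_of_mem _ hx)) (fun n => ?_)
      have := hcnt (n + 1)
      simp only [List.take_succ_cons, List.countP_cons, hp] at this
      simp at this
      omega
    · rw [if_neg hp]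
      have h1 := hcnt 1
      simp only [List.take_succ_cons, List.take_zero, List.countP_cons, List.countP_nil] at h1
      rw [Bool.not_eq_true] at hp
      simp [hp] at h1
      refine ⟨h1, ?_⟩
      refine ih (L - 1) (fun x hx => hlen x (List.mem_cons_of_mem _ hx)) (fun n => ?_)
      have := hcnt (n + 1)
      simp only [List.take_succ_cons, List.countP_cons, hp] at this
      simp at this
      omega

lemma pre_ok (A : List (List Int)) (h : Pre_solve A) : Ok 0 A := by
  obtain ⟨h1, h2⟩ := h
  refine ok_of_count A 0 h1 (fun n => ?_)
  by_cases hn : n ≤ A.length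
  · have := h2 n (List.mem_range.2 (by omega)); omega
  · have hA : A.take n = A.take A.length := by
      rw [List.take_of_length_le (by omega), List.take_length]
    rw [hA]
    have := h2 A.length (List.mem_range.2 (by omega)); omega

-- ===== VERDICT (by name: the statement is the Claim_ definition above) =====
theorem solve_spec : Claim_equal_solve := by
  intro A _ hPre
  unfold Spec_solve solve solve_alt
  refine fold_eq A _ _ _ [] [] ?_ (pre_ok A hPre)
  refine ⟨?_, ?_, ?_⟩
  · intro e; simp [fsts, desc, PySem.Dict.getD_empty]
  · intro f; simp [PySem.Dict.getD_empty]
  · simp [PySem.List.max?]
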